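-- pv_equiv track=rewrite | github.com/lndaquino/data-structures-and-algorithms-using-python | Algorithms/knapsackProblem.py | gerar_vizinhos
-- ===== SOURCE A (Python) =====
-- def gerar_vizinhos(melhor_solucao, max_vizinhos):
--   vizinhos, pos = [], 0
--   for i in range(max_vizinhos):
--     vizinho = []
--     for j in range(len(melhor_solucao)):
--       if j == pos:
--         if melhor_solucao[j] == 0:
--           vizinho.append(1)
--         else:
--           vizinho.append(0)
--       else:
--         vizinho.append(melhor_solucao[j])
--     vizinhos.append(vizinho)
--     pos += 1
--   return vizinhos
-- ===== SOURCE B (Python) =====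
-- def gerar_vizinhos(melhor_solucao, max_vizinhos):
--     # One sweep over the solution with a growing prefix and a shrinking rest:
--     # each step emits prefix + [flipped head] + rest, no indexing at all;
--     # any neighbors still owed beyond the list length are unchanged copies.
--     vizinhos = []
--     prefixo = []
--     resto = list(melhor_solucao)
--     while resto and len(vizinhos) < max_vizinhos:
--         x = resto[0]
--         resto = resto[1:]
--         vizinhos.append(prefixo + [1 if x == 0 else 0] + resto)
--         prefixo.append(x)
--     while len(vizinhos) < max_vizinhos:
--         vizinhos.append(list(melhor_solucao))
--     return vizinhos
-- ===== Notes on version B (the rewrite author's own statement) =====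
-- stated objective: alternative
-- what changed: Replaces A's nested indexed loops (rebuilding each neighbor element by element with a j==pos branch) by a single sweep over the solution that maintains a growing prefix and shrinking rest, emitting prefix+[flipped head]+rest per step, then pads with unchanged copies; no indexing anywhere.
import Mathlib
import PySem

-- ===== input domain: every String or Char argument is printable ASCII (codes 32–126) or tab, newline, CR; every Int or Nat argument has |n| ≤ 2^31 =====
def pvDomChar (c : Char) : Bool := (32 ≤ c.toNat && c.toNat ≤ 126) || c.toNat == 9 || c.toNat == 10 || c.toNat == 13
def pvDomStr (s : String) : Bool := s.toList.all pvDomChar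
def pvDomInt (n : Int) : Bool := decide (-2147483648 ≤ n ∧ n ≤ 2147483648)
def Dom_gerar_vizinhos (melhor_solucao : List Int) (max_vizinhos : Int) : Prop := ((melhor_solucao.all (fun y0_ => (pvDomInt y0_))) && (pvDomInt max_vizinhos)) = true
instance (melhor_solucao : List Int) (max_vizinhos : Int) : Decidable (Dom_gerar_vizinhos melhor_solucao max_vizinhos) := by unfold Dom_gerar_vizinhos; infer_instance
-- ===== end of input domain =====

-- B is a different decomposition: a single prefix/rest sweep over the solution (no indexing)
-- plus padding with unchanged copies, instead of A's nested indexed loops with a j==pos branch.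

-- ===== PORT A =====
-- literal port of A: outer loop over range(max_vizinhos) with state (vizinhos, pos);
-- inner loop over range(len) appends either the flipped bit (at j == pos) or the original element
def gerar_vizinhos (melhor_solucao : List Int) (max_vizinhos : Int) : List (List Int) :=
  ((PySem.List.pyRange 0 max_vizinhos 1).foldl
    (fun (st : List (List Int) × Int) _i =>
      let vizinho := (PySem.List.pyRange 0 (melhor_solucao.length : Int) 1).foldl
        (fun viz j =>
          if j = st.2 then
            (if PySem.List.pyGetD melhor_solucao j 0 = 0 then viz ++ [(1 : Int)] else viz ++ [(0 : Int)])
          else viz ++ [PySem.List.pyGetD melhor_solucao j 0])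
        []
      (st.1 ++ [vizinho], st.2 + 1))
    ([], 0)).1

-- ===== PORT B =====
-- B's first while loop: walk the rest of the list, carrying the prefix and the number of
-- neighbors still needed; emits prefix ++ [flipped head] ++ rest each step
def pvSweep (prefixo : List Int) : List Int → Nat → List (List Int)
  | _, 0 => []
  | [], _ + 1 => []
  | x :: resto, n + 1 =>
      (prefixo ++ [if x = 0 then 1 else 0] ++ resto) :: pvSweep (prefixo ++ [x]) resto n

def gerar_vizinhos_alt (melhor_solucao : List Int) (max_vizinhos : Int) : List (List Int) :=
  let s := pvSweep [] melhor_solucao max_vizinhos.toNat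
  -- B's second while loop: pad with unchanged copies until max_vizinhos neighbors exist
  s ++ List.replicate (max_vizinhos.toNat - s.length) melhor_solucao

-- ===== PRECONDITION & SPEC =====
def Spec_gerar_vizinhos (melhor_solucao : List Int) (max_vizinhos : Int) (out : List (List Int)) : Prop := out = gerar_vizinhos_alt melhor_solucao max_vizinhos
instance (melhor_solucao : List Int) (max_vizinhos : Int) (out : List (List Int)) : Decidable (Spec_gerar_vizinhos melhor_solucao max_vizinhos out) := by unfold Spec_gerar_vizinhos; infer_instance

-- ===== CLAIM (what is proved, stated in full; the proofs are below) =====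
def Claim_equal_gerar_vizinhos : Prop := ∀ (melhor_solucao : List Int) (max_vizinhos : Int), Dom_gerar_vizinhos melhor_solucao max_vizinhos → Spec_gerar_vizinhos melhor_solucao max_vizinhos (gerar_vizinhos melhor_solucao max_vizinhos)

-- ===== LEMMAS AND PROOFS =====

-- the neighbor at position p, as "copy with one index set" (proof-side characterisation)
def pvVizinho (melhor_solucao : List Int) (i : Int) : List Int :=
  if i < (melhor_solucao.length : Int) then
    melhor_solucao.set i.toNat (if PySem.List.pyGetD melhor_solucao i 0 = 0 then 1 else 0)
  else melhor_solucao

-- A's inner loop, as a function of the pos value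
def pvInnerA (ms : List Int) (p : Int) : List Int :=
  (PySem.List.pyRange 0 (ms.length : Int) 1).foldl
    (fun viz j =>
      if j = p then
        (if PySem.List.pyGetD ms j 0 = 0 then viz ++ [(1 : Int)] else viz ++ [(0 : Int)])
      else viz ++ [PySem.List.pyGetD ms j 0])
    []

theorem pvInnerA_eq_map (ms : List Int) (p : Int) :
    pvInnerA ms p = (PySem.List.pyRange 0 (ms.length : Int) 1).map
      (fun j => if j = p then (if PySem.List.pyGetD ms j 0 = 0 then (1 : Int) else 0)
                else PySem.List.pyGetD ms j 0) := by
  unfold pvInnerA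
  rw [PySem.List.foldl_congr_mem (g := fun viz j => viz ++
      [if j = p then (if PySem.List.pyGetD ms j 0 = 0 then (1 : Int) else 0)
       else PySem.List.pyGetD ms j 0])]
  · exact PySem.List.foldl_append_singleton_eq_map _ _ _
  · intro acc x _; split_ifs <;> rfl

theorem pvInnerA_eq_vizinho (ms : List Int) (p : Int) (hp : 0 ≤ p) :
    pvInnerA ms p = pvVizinho ms p := by
  rw [pvInnerA_eq_map]
  unfold pvVizinho
  by_cases h : p < (ms.length : Int)
  · rw [if_pos h]
    apply List.ext_getElem
    · simp [PySem.List.length_pyRange_one]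
    · intro k h1 h2
      have hk : k < ms.length := by simpa using h2
      have hkr : k < (PySem.List.pyRange 0 (ms.length : Int) 1).length := by
        simpa [PySem.List.length_pyRange_one] using hk
      rw [List.getElem_map, List.getElem_set]
      have hval : (PySem.List.pyRange 0 (ms.length : Int) 1)[k] = (k : Int) := by
        rw [PySem.List.getElem_pyRange_one]; omega
      rw [hval]
      by_cases hkp : (k : Int) = p
      · rw [if_pos hkp, if_pos (by omega : p.toNat = k), ← hkp]
      · rw [if_neg hkp, if_neg (by omega : ¬ p.toNat = k)]
        simp [PySem.List.pyGetD_natCast, List.getElem?_eq_getElem hk]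
  · rw [if_neg h]
    have hc : ∀ j ∈ PySem.List.pyRange 0 (ms.length : Int) 1,
        (if j = p then (if PySem.List.pyGetD ms j 0 = 0 then (1 : Int) else 0)
         else PySem.List.pyGetD ms j 0) = PySem.List.pyGetD ms j 0 := by
      intro j hj
      rw [PySem.List.mem_pyRange_one] at hj
      have : j ≠ p := by omega
      simp [this]
    rw [List.map_congr_left hc]
    exact PySem.List.map_pyGetD_pyRange_zero' ms 0

-- the outer loop of A: pos tracks the number of iterations done so far
theorem pvOuter (f : Int → List Int) (l : List Int) :
    ∀ (acc : List (List Int)) (p : Int),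
      (l.foldl (fun (st : List (List Int) × Int) _i => (st.1 ++ [f st.2], st.2 + 1)) (acc, p))
        = (acc ++ (List.range l.length).map (fun (k : Nat) => f (p + (k : Int))), p + (l.length : Int)) := by
  induction l with
  | nil => intro acc p; simp
  | cons x xs ih =>
    intro acc p
    rw [List.foldl_cons, ih]
    rw [List.length_cons, List.range_succ_eq_map]
    refine Prod.ext ?_ ?_
    · simp only [List.map_cons, List.map_map, List.append_assoc, List.cons_append,
        List.nil_append, Nat.cast_zero, add_zero]
      congr 1
      congr 1
      apply List.map_congr_left
      intro k _
      simp only [Function.comp_apply]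
      congr 1
      push_cast
      ring
    · push_cast
      ring

-- B's sweep produces exactly the in-range "set one index" neighbors, prefixed
theorem pvSweep_eq_map (resto : List Int) :
    ∀ (pre : List Int) (n : Nat),
      pvSweep pre resto n = (List.range (min resto.length n)).map
        (fun k => pre ++ resto.set k (if resto.getD k 0 = 0 then 1 else 0)) := by
  induction resto with
  | nil => intro pre n; cases n <;> simp [pvSweep]
  | cons x xs ih =>
    intro pre n
    cases n with
    | zero => simp [pvSweep]
    | succ m =>
      rw [pvSweep, ih]
      have hmin : min (x :: xs).length (m + 1) = min xs.length m + 1 := by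
        simp only [List.length_cons]
        omega
      rw [hmin, List.range_succ_eq_map, List.map_cons, List.map_map]
      refine congrArg₂ List.cons ?_ ?_
      · simp
      · apply List.map_congr_left
        intro k _
        simp only [Function.comp_apply, List.set_cons_succ,
          List.getD, List.getElem?_cons_succ, List.append_assoc, List.cons_append,
          List.nil_append]
        rfl

-- pvVizinho at an in-range Nat index matches the sweep's "set" form
theorem pvVizinho_lt (ms : List Int) (k : Nat) (hk : k < ms.length) :
    pvVizinho ms (k : Int) = ms.set k (if ms.getD k 0 = 0 then 1 else 0) := by
  unfold pvVizinho
  rw [if_pos (by exact_mod_cast hk)]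
  simp [PySem.List.pyGetD_natCast, List.getElem?_eq_getElem hk, List.getD,
    Int.toNat_natCast]

theorem pvVizinho_ge (ms : List Int) (k : Nat) (hk : ms.length ≤ k) :
    pvVizinho ms (k : Int) = ms := by
  unfold pvVizinho
  rw [if_neg (by exact_mod_cast Nat.not_lt.mpr hk)]

-- ===== VERDICT (by name: the statement is the Claim_ definition above) =====
theorem gerar_vizinhos_spec : Claim_equal_gerar_vizinhos := by
  intro ms mv _
  unfold Spec_gerar_vizinhos gerar_vizinhos_alt
  have hA : gerar_vizinhos ms mv =
      ((PySem.List.pyRange 0 mv 1).foldl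
        (fun (st : List (List Int) × Int) _i => (st.1 ++ [pvInnerA ms st.2], st.2 + 1)) ([], 0)).1 := rfl
  have hAmap : gerar_vizinhos ms mv
      = (List.range mv.toNat).map (fun (k : Nat) => pvVizinho ms (k : Int)) := by
    rw [hA, pvOuter (pvInnerA ms) (PySem.List.pyRange 0 mv 1) [] 0]
    simp only [List.nil_append, PySem.List.length_pyRange_one, Int.sub_zero]
    apply List.map_congr_left
    intro k _
    simp only [Int.zero_add]
    exact pvInnerA_eq_vizinho ms (k : Int) (Int.natCast_nonneg k)
  rw [hAmap, pvSweep_eq_map ms [] mv.toNat]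
  set N := mv.toNat with hN
  set m := min ms.length N with hm
  simp only [List.nil_append, List.length_map, List.length_range]
  have hsplit : List.range N = List.range m ++ (List.range (N - m)).map (fun k => m + k) := by
    conv_lhs => rw [show N = m + (N - m) by omega]
    rw [List.range_add]
  rw [hsplit, List.map_append, List.map_map]
  congr 1
  · apply List.map_congr_left
    intro k hk
    rw [List.mem_range] at hk
    simp [pvVizinho_lt ms k (show k < ms.length by omega), List.getD]
  · rw [List.eq_replicate_iff]
    constructor
    · simp
    · intro b hb
      rw [List.mem_map] at hb
      obtain ⟨k, hk, hbk⟩ := hb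
      rw [List.mem_range] at hk
      rw [← hbk]
      exact pvVizinho_ge ms (m + k) (by omega)
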